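-- pv_equiv track=rewrite | github.com/falcon71181/log_sorter | seq_win.py | organize_seqs_by_domain
-- ===== SOURCE A (Python) =====
-- def organize_seqs_by_domain(seqs):
--     domain_data = {}
--     for seq in seqs:
--         domain = seq[1]
--         username = seq[2]
--         password = seq[3]
--         if domain not in domain_data:
--             domain_data[domain] = []
--         domain_data[domain].append(f"{username}:{password}")
--
--     return domain_data
-- ===== SOURCE B (Python) =====
-- def organize_seqs_by_domain(seqs):
--     keys = list(dict.fromkeys(seq[1] for seq in seqs))
--     return {d: [f"{seq[2]}:{seq[3]}" for seq in seqs if seq[1] == d] for d in keys}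
-- ===== Notes on version B (the rewrite author's own statement) =====
-- stated objective: alternative
-- what changed: A builds the grouping incrementally with a running dict (membership test, seed-empty-list, append per row); B is a two-phase grouping: first dedup the domain keys in first-appearance order, then build each group's value list with one filtering comprehension per key.
import Mathlib
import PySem

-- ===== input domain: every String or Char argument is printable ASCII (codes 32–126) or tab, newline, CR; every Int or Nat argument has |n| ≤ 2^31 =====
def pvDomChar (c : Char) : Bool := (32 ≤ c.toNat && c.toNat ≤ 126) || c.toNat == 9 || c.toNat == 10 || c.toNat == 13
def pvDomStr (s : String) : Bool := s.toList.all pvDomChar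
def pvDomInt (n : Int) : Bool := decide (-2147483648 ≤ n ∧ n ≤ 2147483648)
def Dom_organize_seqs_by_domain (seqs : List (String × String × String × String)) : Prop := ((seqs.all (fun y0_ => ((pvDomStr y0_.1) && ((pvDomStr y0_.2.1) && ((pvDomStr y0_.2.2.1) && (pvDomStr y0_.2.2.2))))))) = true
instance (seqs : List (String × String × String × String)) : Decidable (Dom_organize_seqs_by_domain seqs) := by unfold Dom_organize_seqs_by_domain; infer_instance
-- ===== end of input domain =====

-- B replaces A's running first-appearance dict with a dedup-keys pass plus one filtering pass per key (alternative decomposition, same results).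
-- ===== PORT A =====
def organize_seqs_by_domain (seqs : List (String × String × String × String)) : List (String × List String) :=
  (seqs.foldl (fun domain_data seq =>
      let domain := seq.2.1
      let username := seq.2.2.1
      let password := seq.2.2.2
      let domain_data :=
        if domain_data.contains domain then domain_data
        else domain_data.insert domain ([] : List String)
      domain_data.modify domain [] (fun l => l ++ [username ++ ":" ++ password]))
    PySem.Dict.empty).items

-- ===== PORT B =====
def organize_seqs_by_domain_alt (seqs : List (String × String × String × String)) : List (String × List String) :=
  let keys := PySem.List.dedup (seqs.map (fun seq => seq.2.1))
  keys.map (fun d =>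
    (d, (seqs.filter (fun seq => seq.2.1 == d)).map (fun seq => seq.2.2.1 ++ ":" ++ seq.2.2.2)))

-- ===== PRECONDITION & SPEC =====
def Spec_organize_seqs_by_domain (seqs : List (String × String × String × String)) (out : List (String × List String)) : Prop := out = organize_seqs_by_domain_alt seqs
instance (seqs : List (String × String × String × String)) (out : List (String × List String)) : Decidable (Spec_organize_seqs_by_domain seqs out) := by unfold Spec_organize_seqs_by_domain; infer_instance

-- ===== CLAIM (what is proved, stated in full; the proofs are below) =====
def Claim_equal_organize_seqs_by_domain : Prop := ∀ (seqs : List (String × String × String × String)), Dom_organize_seqs_by_domain seqs → Spec_organize_seqs_by_domain seqs (organize_seqs_by_domain seqs)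

-- ===== LEMMAS AND PROOFS =====

-- the membership-guarded seed of an empty list is absorbed by modify-with-default-[]
theorem setdefault_modify_append {ν : Type} (d : PySem.Dict String (List ν)) (k : String) (v : ν) :
    (if d.contains k then d else d.insert k ([] : List ν)).modify k [] (fun l => l ++ [v])
      = d.modify k [] (fun l => l ++ [v]) := by
  by_cases h : d.contains k = true
  · simp [h]
  · have h' : d.contains k = false := by simpa using h
    simp [PySem.Dict.modify, h', PySem.Dict.getD_insert_self,
      PySem.Dict.insert_insert_self, PySem.Dict.getD_of_not_contains]

theorem organize_seqs_by_domain_spec : Claim_equal_organize_seqs_by_domain := by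
  intro seqs _
  unfold Spec_organize_seqs_by_domain organize_seqs_by_domain organize_seqs_by_domain_alt
  simp only []
  -- absorb the membership-guarded seed into modify
  have hstep : (fun (d : PySem.Dict String (List String)) (seq : String × String × String × String) =>
      (if d.contains seq.2.1 then d else d.insert seq.2.1 ([] : List String)).modify seq.2.1 []
        (fun l => l ++ [seq.2.2.1 ++ ":" ++ seq.2.2.2]))
      = fun d seq => d.modify seq.2.1 [] (fun l => l ++ [seq.2.2.1 ++ ":" ++ seq.2.2.2]) := by
    funext d seq
    exact setdefault_modify_append d seq.2.1 _
  rw [hstep]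
  -- view the loop as a fold over (key, value) pairs
  have hmap : seqs.foldl (fun d seq => d.modify seq.2.1 [] (fun l => l ++ [seq.2.2.1 ++ ":" ++ seq.2.2.2])) PySem.Dict.empty
      = (seqs.map (fun seq => (seq.2.1, seq.2.2.1 ++ ":" ++ seq.2.2.2))).foldl
          (fun d p => d.modify p.1 [] (fun l => l ++ [p.2])) PySem.Dict.empty := by
    rw [List.foldl_map]
  rw [hmap]
  set pairs := seqs.map (fun seq => (seq.2.1, seq.2.2.1 ++ ":" ++ seq.2.2.2)) with hpairs
  have hnodup : ((pairs.foldl (fun d p => d.modify p.1 [] (fun l => l ++ [p.2])) PySem.Dict.empty)).keys.Nodup := by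
    exact PySem.Dict.nodup_keys_foldl_modify_key pairs Prod.fst [] (fun _ p l => l ++ [p.2]) _ (by simp)
  rw [PySem.Dict.items_eq_map_keys _ hnodup []]
  have hkeys : ((pairs.foldl (fun d p => d.modify p.1 [] (fun l => l ++ [p.2])) PySem.Dict.empty)).keys
      = PySem.List.dedup (seqs.map (fun seq => seq.2.1)) := by
    rw [PySem.Dict.keys_foldl_modify_key pairs Prod.fst [] (fun _ p l => l ++ [p.2])]
    simp [hpairs, PySem.Set.update, PySem.Set.ofList_eq_foldl, List.map_map, PySem.Dict.keys_empty,
      Function.comp_def]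
  rw [hkeys]
  apply List.map_congr_left
  intro k hk
  rw [PySem.Dict.getD_foldl_modify_append]
  simp [hpairs, List.filter_map, List.map_map, Function.comp_def]
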